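-- pv_equiv track=rewrite | github.com/danny-1k/FX-trends-analysis | src/data/generate_currency_pairs.py | create_cross_pairs
-- ===== SOURCE A (Python) =====
-- def create_cross_pairs(currencies):
--     cross_pairs = []
--     for currency in currencies:
--         for other_currency in currencies:
--             if other_currency != currency:
--                 pair = f"{currency}{other_currency}"
--                 if pair not in cross_pairs:
--                     cross_pairs.append(pair)
--     return cross_pairs
-- ===== SOURCE B (Python) =====
-- def create_cross_pairs(currencies):
--     # Different strategy: materialise the raw concatenated-pair stream, then
--     # recover the first-occurrence order by SORTING the distinct pairs by the
--     # index of their first appearance in the stream (pairs.index is injective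
--     # on set(pairs), so the sort is deterministic and ties cannot occur).
--     pairs = [a + b for a in currencies for b in currencies if b != a]
--     return sorted(set(pairs), key=pairs.index)
-- ===== Notes on version B (the rewrite author's own statement) =====
-- stated objective: alternative
-- what changed: B flattens the pair stream once, takes the distinct pairs as a set, and SORTS them by first-occurrence index (pairs.index as sort key), instead of A's nested loops that grow the result with a membership-checked append; order comes from a sort, not from append order.
import Mathlib
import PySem

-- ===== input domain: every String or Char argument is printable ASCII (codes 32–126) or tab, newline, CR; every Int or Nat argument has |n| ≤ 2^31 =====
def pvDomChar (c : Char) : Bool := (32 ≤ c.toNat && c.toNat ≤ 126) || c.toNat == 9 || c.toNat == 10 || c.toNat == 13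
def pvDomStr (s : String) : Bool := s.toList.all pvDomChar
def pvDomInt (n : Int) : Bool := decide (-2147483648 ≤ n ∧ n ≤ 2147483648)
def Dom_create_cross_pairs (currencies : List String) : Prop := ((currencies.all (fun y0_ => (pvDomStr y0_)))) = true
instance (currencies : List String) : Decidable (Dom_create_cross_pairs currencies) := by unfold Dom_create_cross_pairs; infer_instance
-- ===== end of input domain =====

-- ===== PORT A =====
-- B replaces A's membership-checked accumulation by flatten + set + sort by first-occurrence index (alternative algorithm, not faster).
def create_cross_pairs (currencies : List String) : List String :=
  currencies.foldl (fun cross_pairs currency =>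
    currencies.foldl (fun cross_pairs other_currency =>
      if other_currency ≠ currency then
        let pair := currency ++ other_currency
        if pair ∈ cross_pairs then cross_pairs else cross_pairs ++ [pair]
      else cross_pairs) cross_pairs) []

-- ===== PORT B =====
def create_cross_pairs_alt (currencies : List String) : List String :=
  let pairs := currencies.flatMap (fun a => (currencies.filter (fun b => b ≠ a)).map (fun b => a ++ b))
  PySem.List.sorted (PySem.Set.ofList pairs) (fun p => (PySem.List.index? pairs p).getD 0)

-- ===== PRECONDITION & SPEC =====
def Spec_create_cross_pairs (currencies : List String) (out : List String) : Prop := out = create_cross_pairs_alt currencies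
instance (currencies : List String) (out : List String) : Decidable (Spec_create_cross_pairs currencies out) := by unfold Spec_create_cross_pairs; infer_instance

-- ===== CLAIM (what is proved, stated in full; the proofs are below) =====
def Claim_equal_create_cross_pairs : Prop := ∀ (currencies : List String), Dom_create_cross_pairs currencies → Spec_create_cross_pairs currencies (create_cross_pairs currencies)

-- ===== LEMMAS AND PROOFS =====

-- one insert-if-absent step, as A's inner branch performs it
def pvIns (acc : List String) (x : String) : List String :=
  if x ∈ acc then acc else acc ++ [x]

-- A's inner loop body collapses to a fold of pvIns over that row's pair list
theorem pvRow (l : List String) (a : String) (acc : List String) :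
    l.foldl (fun acc b =>
      if b ≠ a then (if a ++ b ∈ acc then acc else acc ++ [a ++ b]) else acc) acc
      = ((l.filter (fun b => b ≠ a)).map (fun b => a ++ b)).foldl pvIns acc := by
  induction l generalizing acc with
  | nil => rfl
  | cons x xs ih =>
      simp only [List.foldl_cons, List.filter_cons]
      by_cases h : x ≠ a
      · rw [if_pos h,
          show (if decide (x ≠ a) = true then x :: List.filter (fun b => decide (b ≠ a)) xs
                else List.filter (fun b => decide (b ≠ a)) xs)
              = x :: List.filter (fun b => decide (b ≠ a)) xs from if_pos (by simpa using h),
          List.map_cons, List.foldl_cons]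
        exact ih _
      · rw [if_neg h,
          show (if decide (x ≠ a) = true then x :: List.filter (fun b => decide (b ≠ a)) xs
                else List.filter (fun b => decide (b ≠ a)) xs)
              = List.filter (fun b => decide (b ≠ a)) xs from if_neg (by simpa using h)]
        exact ih _

-- nested fold over rows = fold of pvIns over the flattened pair list
theorem pvFlat (l : List String) (g : String → List String) (acc : List String) :
    l.foldl (fun acc a => (g a).foldl pvIns acc) acc = (l.flatMap g).foldl pvIns acc := by
  induction l generalizing acc with
  | nil => rfl
  | cons x xs ih => simp [List.flatMap_cons, List.foldl_append, ih]

-- folding pvIns from a Set-shaped accumulator IS PySem.Set.add folding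
theorem pvIns_eq_add (l : List String) (acc : List String) :
    l.foldl pvIns acc = l.foldl PySem.Set.add acc := by
  induction l generalizing acc with
  | nil => rfl
  | cons x xs ih =>
      simp only [List.foldl_cons, pvIns, PySem.Set.add]
      by_cases h : x ∈ acc
      · simp [h, ih]
      · simp [h, ih]

-- list.index of a member is its idxOf
theorem pvIdxOf? (xs : List String) (k : String) (h : k ∈ xs) :
    List.idxOf? k xs = some (List.idxOf k xs) := by
  induction xs with
  | nil => cases h
  | cons x xs ih =>
      by_cases hx : x = k
      · simp [List.idxOf?_cons, hx]
      · have hk : k ∈ xs := by cases h with | head => exact absurd rfl hx | tail _ h => exact h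
        simp [List.idxOf?_cons, hx, ih hk]

-- the order-preserving dedup is strictly increasing in first-occurrence index
theorem pvPairwiseIdx (xs : List String) :
    (PySem.Set.ofList xs).Pairwise (fun a b => List.idxOf a xs < List.idxOf b xs) := by
  induction xs with
  | nil => simp [PySem.Set.ofList, PySem.Set.empty]
  | cons x xs ih =>
      rw [PySem.Set.ofList_cons]
      refine List.Pairwise.cons ?_ ?_
      · intro b hb
        have hbx : b ≠ x := by
          have := List.of_mem_filter hb
          simpa using this
        rw [List.idxOf_cons_self, List.idxOf_cons_ne _ (Ne.symm hbx)]
        exact Nat.succ_pos _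
      · refine (List.Pairwise.filter _ ih).imp_of_mem ?_
        intro a b ha hb hab
        have hax : a ≠ x := by simpa using List.of_mem_filter ha
        have hbx : b ≠ x := by simpa using List.of_mem_filter hb
        rw [List.idxOf_cons_ne _ (Ne.symm hax), List.idxOf_cons_ne _ (Ne.symm hbx)]
        exact Nat.succ_lt_succ hab

-- ===== VERDICT (by name: the statement is the Claim_ definition above) =====
theorem create_cross_pairs_spec : Claim_equal_create_cross_pairs := by
  intro currencies _
  show create_cross_pairs currencies = create_cross_pairs_alt currencies
  unfold create_cross_pairs create_cross_pairs_alt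
  simp only [pvRow]
  rw [pvFlat, pvIns_eq_add]
  set pairs := currencies.flatMap
      (fun a => (currencies.filter (fun b => b ≠ a)).map (fun b => a ++ b)) with hp
  have hA : pairs.foldl PySem.Set.add [] = PySem.Set.ofList pairs := rfl
  rw [hA]
  refine (PySem.List.sorted_eq_of_perm_of_pairwise_lt _ _ _ (List.Perm.refl _) ?_).symm
  refine (pvPairwiseIdx pairs).imp_of_mem ?_
  intro a b ha hb hab
  have ha' : a ∈ pairs := (PySem.Set.mem_ofList pairs a).mp ha
  have hb' : b ∈ pairs := (PySem.Set.mem_ofList pairs b).mp hb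
  simp only [PySem.List.index?, pvIdxOf? pairs a ha', pvIdxOf? pairs b hb', Option.getD_some]
  exact hab
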